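-- pv_equiv track=rewrite | github.com/amirshahdadian/wikiquote-voice-search | backend/app/search_normalization.py | build_legacy_contraction_variant
-- ===== SOURCE A (Python) =====
-- CONTRACTION_SUFFIXES = ("ll", "re", "ve", "d", "m", "s", "t")
--
-- CONTRACTION_BASES = {
--     "ain",
--     "are",
--     "can",
--     "couldn",
--     "didn",
--     "doesn",
--     "do",
--     "don",
--     "hadn",
--     "hasn",
--     "haven",
--     "he",
--     "here",
--     "how",
--     "i",
--     "isn",
--     "it",
--     "let",
--     "mustn",
--     "she",
--     "shouldn",
--     "that",
--     "there",
--     "they",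
--     "wasn",
--     "we",
--     "weren",
--     "what",
--     "where",
--     "who",
--     "wo",
--     "wouldn",
--     "you",
-- }
--
-- def build_legacy_contraction_variant(normalized_text: str) -> str:
--     """Approximate legacy apostrophe splitting for contraction-like tokens."""
--     tokens: list[str] = []
--     changed = False
--
--     for token in normalized_text.split():
--         replacement = token
--         for suffix in CONTRACTION_SUFFIXES:
--             if not token.endswith(suffix) or len(token) <= len(suffix) + 1:
--                 continue
--             base = token[: -len(suffix)]
--             if base not in CONTRACTION_BASES:
--                 continue
--             replacement = f"{base} {suffix}"
--             changed = True
--             break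
--         tokens.append(replacement)
--
--     if not changed:
--         return normalized_text
--     return " ".join(" ".join(tokens).split())
-- ===== SOURCE B (Python) =====
-- CONTRACTION_SUFFIXES = ("ll", "re", "ve", "d", "m", "s", "t")
--
-- CONTRACTION_BASES = {
--     "ain", "are", "can", "couldn", "didn", "doesn", "do", "don", "hadn",
--     "hasn", "haven", "he", "here", "how", "i", "isn", "it", "let", "mustn",
--     "she", "shouldn", "that", "there", "they", "wasn", "we", "weren",
--     "what", "where", "who", "wo", "wouldn", "you",
-- }
--
-- # Precomputed table: every valid concatenation base+suffix -> "base suffix".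
-- # Bases of length <= 1 (only "i") are skipped, matching the length guard in
-- # the legacy per-token suffix scan; all 224 keys are distinct, so a single
-- # lookup reproduces the first-matching-suffix result exactly.
-- _LEGACY_SPLITS = {
--     base + suffix: f"{base} {suffix}"
--     for base in CONTRACTION_BASES
--     if len(base) > 1
--     for suffix in CONTRACTION_SUFFIXES
-- }
--
--
-- def build_legacy_contraction_variant(normalized_text: str) -> str:
--     """Approximate legacy apostrophe splitting for contraction-like tokens."""
--     tokens: list[str] = []
--     changed = False
--
--     for token in normalized_text.split():
--         replacement = _LEGACY_SPLITS.get(token)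
--         if replacement is None:
--             tokens.append(token)
--         else:
--             tokens.append(replacement)
--             changed = True
--
--     if not changed:
--         return normalized_text
--     return " ".join(" ".join(tokens).split())
-- ===== Notes on version B (the rewrite author's own statement) =====
-- stated objective: alternative
-- what changed: Replaced the per-token scan over all seven suffixes (endswith + slice + set membership each) by a single lookup in a module-level dict precomputed from CONTRACTION_BASES x CONTRACTION_SUFFIXES (bases of length <= 1 skipped, matching the length guard); all 224 keys are distinct, so one lookup reproduces the first-matching-suffix result exactly.
import Mathlib
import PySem

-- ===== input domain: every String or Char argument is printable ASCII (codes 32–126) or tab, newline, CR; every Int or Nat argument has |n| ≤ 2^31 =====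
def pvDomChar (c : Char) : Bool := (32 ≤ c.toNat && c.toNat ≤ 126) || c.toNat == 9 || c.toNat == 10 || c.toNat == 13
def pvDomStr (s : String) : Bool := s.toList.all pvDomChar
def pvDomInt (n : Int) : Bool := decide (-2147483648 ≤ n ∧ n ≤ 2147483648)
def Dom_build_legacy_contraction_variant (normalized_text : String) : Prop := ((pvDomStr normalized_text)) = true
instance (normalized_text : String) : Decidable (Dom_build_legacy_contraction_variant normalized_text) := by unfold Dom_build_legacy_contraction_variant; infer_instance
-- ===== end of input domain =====

-- B replaces A's per-token suffix scan by a single lookup in a precomputed base+suffix table.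

-- ===== PORT A =====
def pvSuffixes : List (List Char) :=
  ["ll".toList, "re".toList, "ve".toList, "d".toList, "m".toList, "s".toList, "t".toList]

def pvBases : PySem.Set (List Char) := PySem.Set.ofList
  ["ain".toList, "are".toList, "can".toList, "couldn".toList, "didn".toList, "doesn".toList,
   "do".toList, "don".toList, "hadn".toList, "hasn".toList, "haven".toList, "he".toList,
   "here".toList, "how".toList, "i".toList, "isn".toList, "it".toList, "let".toList,
   "mustn".toList, "she".toList, "shouldn".toList, "that".toList, "there".toList,
   "they".toList, "wasn".toList, "we".toList, "weren".toList, "what".toList,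
   "where".toList, "who".toList, "wo".toList, "wouldn".toList, "you".toList]

-- A's inner 'for suffix in CONTRACTION_SUFFIXES: … break' loop; returns (replacement, matched)
def pvScan (token : List Char) : List (List Char) → List Char × Bool
  | [] => (token, false)
  | suffix :: rest =>
      if !(PySem.Chars.endswith token suffix) || token.length ≤ suffix.length + 1 then
        pvScan token rest
      else
        let base := PySem.List.slice token none (some (-(suffix.length : Int)))
        if !(PySem.Set.contains pvBases base) then
          pvScan token rest
        else
          (base ++ ' ' :: suffix, true)

def build_legacy_contraction_variant (normalized_text : String) : String :=
  let st := (PySem.Chars.split₀ normalized_text.toList).foldl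
    (fun (acc : List (List Char) × Bool) token =>
      let r := pvScan token pvSuffixes
      (acc.1 ++ [r.1], acc.2 || r.2)) ([], false)
  if st.2 then
    String.ofList (PySem.Chars.join [' '] (PySem.Chars.split₀ (PySem.Chars.join [' '] st.1)))
  else normalized_text

-- ===== PORT B =====
-- B's precomputed module-level dict {base+suffix: "base suffix"} (bases of length ≤ 1 skipped)
def pvLegacySplits : PySem.Dict (List Char) (List Char) :=
  pvBases.foldl
    (fun d base =>
      if 1 < base.length then
        pvSuffixes.foldl (fun d suffix => d.insert (base ++ suffix) (base ++ ' ' :: suffix)) d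
      else d)
    PySem.Dict.empty

def build_legacy_contraction_variant_alt (normalized_text : String) : String :=
  let st := (PySem.Chars.split₀ normalized_text.toList).foldl
    (fun (acc : List (List Char) × Bool) token =>
      match pvLegacySplits.get? token with
      | none => (acc.1 ++ [token], acc.2)
      | some v => (acc.1 ++ [v], true)) ([], false)
  if st.2 then
    String.ofList (PySem.Chars.join [' '] (PySem.Chars.split₀ (PySem.Chars.join [' '] st.1)))
  else normalized_text

-- ===== PRECONDITION & SPEC =====
def Spec_build_legacy_contraction_variant (normalized_text : String) (out : String) : Prop := out = build_legacy_contraction_variant_alt normalized_text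
instance (normalized_text : String) (out : String) : Decidable (Spec_build_legacy_contraction_variant normalized_text out) := by unfold Spec_build_legacy_contraction_variant; infer_instance

-- ===== CLAIM (what is proved, stated in full; the proofs are below) =====
def Claim_equal_build_legacy_contraction_variant : Prop := ∀ (normalized_text : String), Dom_build_legacy_contraction_variant normalized_text → Spec_build_legacy_contraction_variant normalized_text (build_legacy_contraction_variant normalized_text)

-- ===== LEMMAS AND PROOFS =====

-- every table entry is exactly what A's suffix scan produces on its key
set_option maxRecDepth 100000 in
theorem pvScan_of_mem_items : ∀ p ∈ pvLegacySplits.items, pvScan p.1 pvSuffixes = (p.2, true) := by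
  decide

-- every admissible (base, suffix) pair is a key of the table
set_option maxRecDepth 100000 in
theorem pvGet?_isSome :
    ∀ b ∈ pvBases, 1 < b.length → ∀ s ∈ pvSuffixes, (pvLegacySplits.get? (b ++ s)).isSome := by
  decide

theorem pvSuffix_pos : ∀ s ∈ pvSuffixes, 0 < s.length := by decide

-- A's scan keeps the token when no suffix admits a valid base
theorem pvScan_id (token : List Char) (S : List (List Char))
    (h : ∀ s ∈ S, ¬(PySem.Chars.endswith token s = true ∧ s.length + 1 < token.length ∧
          PySem.Set.contains pvBases (PySem.List.slice token none (some (-(s.length : Int)))) = true)) :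
    pvScan token S = (token, false) := by
  induction S with
  | nil => rfl
  | cons s rest ih =>
    have hs := h s (List.mem_cons_self ..)
    have hrest := fun x hx => h x (List.mem_cons_of_mem _ hx)
    rw [pvScan]
    by_cases h1 : PySem.Chars.endswith token s = true
    · by_cases h2 : token.length ≤ s.length + 1
      · simp only [h1, h2, Bool.not_true, decide_true, Bool.false_or, if_true]
        exact ih hrest
      · have h3 : PySem.Set.contains pvBases
            (PySem.List.slice token none (some (-(s.length : Int)))) = false := by
          cases hb : PySem.Set.contains pvBases
              (PySem.List.slice token none (some (-(s.length : Int))))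
          · rfl
          · exact absurd ⟨h1, by omega, hb⟩ hs
        simp only [h1, h2, h3, Bool.not_true, decide_false, Bool.false_or,
          Bool.not_false, if_true]
        exact ih hrest
    · simp only [Bool.not_eq_true] at h1
      simp only [h1, Bool.not_false, Bool.true_or, if_true]
      exact ih hrest

-- the per-token bridge: A's suffix scan is exactly B's table lookup
theorem pvScan_eq_lookup (token : List Char) :
    pvScan token pvSuffixes =
      match pvLegacySplits.get? token with
      | none => (token, false)
      | some v => (v, true) := by
  cases h : pvLegacySplits.get? token with
  | some v =>
    exact pvScan_of_mem_items (token, v) (PySem.Dict.mem_items_of_get?_eq_some pvLegacySplits h)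
  | none =>
    apply pvScan_id
    rintro s hs ⟨h1, h2, h3⟩
    rw [PySem.Chars.endswith_iff] at h1
    obtain ⟨p, hp⟩ := h1
    have hbase : PySem.List.slice token none (some (-(s.length : Int))) = p := by
      rw [PySem.List.slice_to_neg_natCast _ _ (pvSuffix_pos s hs), ← hp]
      simp [List.length_append]
    rw [hbase, PySem.Set.contains_iff] at h3
    have hplen : 1 < p.length := by
      have := congrArg List.length hp
      simp [List.length_append] at this
      omega
    have hkey := pvGet?_isSome p h3 hplen s hs
    rw [hp, h] at hkey
    simp at hkey

-- ===== VERDICT (by name: the statement is the Claim_ definition above) =====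
theorem build_legacy_contraction_variant_spec : Claim_equal_build_legacy_contraction_variant := by
  intro t _
  unfold Spec_build_legacy_contraction_variant
  unfold build_legacy_contraction_variant build_legacy_contraction_variant_alt
  have hstep : (fun (acc : List (List Char) × Bool) token =>
      let r := pvScan token pvSuffixes
      (acc.1 ++ [r.1], acc.2 || r.2)) =
    (fun (acc : List (List Char) × Bool) token =>
      match pvLegacySplits.get? token with
      | none => (acc.1 ++ [token], acc.2)
      | some v => (acc.1 ++ [v], true)) := by
    funext acc token
    rw [pvScan_eq_lookup]
    cases pvLegacySplits.get? token <;> simp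
  rw [hstep]
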